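-- pv_equiv track=rewrite | github.com/lucianoscarpaci/Technical-Interview-Prep | Unit2/PartB/p8.py | num_equiv_species_pairs
-- ===== SOURCE A (Python) =====
-- def num_equiv_species_pairs(species_pairs):
--     count = {}
--     for pair in species_pairs:
--         normalized_pair = tuple(sorted(pair))
--         if normalized_pair in count:
--             count[normalized_pair] += 1
--         else:
--             count[normalized_pair] = 1
--
--     pairs = 0
--     for c in count.values():
--         pairs += c * (c - 1) // 2
--     return pairs
-- ===== SOURCE B (Python) =====
-- def num_equiv_species_pairs(species_pairs):
--     seen = {}
--     total = 0
--     for pair in species_pairs: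
--         key = tuple(sorted(pair))
--         c = seen.get(key, 0)
--         total += c
--         seen[key] = c + 1
--     return total
-- ===== Notes on version B (the rewrite author's own statement) =====
-- stated objective: simpler
-- what changed: Single pass keeping a running total: each pair adds the number of previously seen equal normalized pairs, replacing the two-phase count-then-sum with the c*(c-1)//2 formula.
import Mathlib
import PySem

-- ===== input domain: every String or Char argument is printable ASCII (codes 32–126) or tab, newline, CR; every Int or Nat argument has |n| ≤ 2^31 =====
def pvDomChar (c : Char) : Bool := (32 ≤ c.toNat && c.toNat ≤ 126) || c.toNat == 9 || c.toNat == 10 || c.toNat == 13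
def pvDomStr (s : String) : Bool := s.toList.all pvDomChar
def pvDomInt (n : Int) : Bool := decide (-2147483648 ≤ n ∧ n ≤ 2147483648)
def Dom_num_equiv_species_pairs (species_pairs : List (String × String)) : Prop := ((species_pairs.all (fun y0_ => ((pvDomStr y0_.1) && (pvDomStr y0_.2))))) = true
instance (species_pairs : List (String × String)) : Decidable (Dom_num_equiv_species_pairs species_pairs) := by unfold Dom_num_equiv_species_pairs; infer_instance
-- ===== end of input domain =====

-- B replaces A's two-phase count-then-sum (c*(c-1)//2 per group) by a single pass with a running
-- total of previously seen equal normalized pairs; objective: simpler.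

-- ===== PORT A =====
-- tuple(sorted(pair)) on a 2-tuple: exact (Python's sorted on two elements swaps iff b < a;
-- String < is code-point lexicographic in both languages)
def pvSortPair (p : String × String) : String × String :=
  if p.2 < p.1 then (p.2, p.1) else (p.1, p.2)

def num_equiv_species_pairs (species_pairs : List (String × String)) : Int :=
  let count := species_pairs.foldl (fun d pair =>
    let normalized_pair := pvSortPair pair
    if d.contains normalized_pair then d.modify normalized_pair 0 (· + 1)
    else d.insert normalized_pair 1) PySem.Dict.empty
  count.values.foldl (fun pairs c => pairs + PySem.Int.floordiv (c * (c - 1)) 2) 0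

-- ===== PORT B =====
def num_equiv_species_pairs_alt (species_pairs : List (String × String)) : Int :=
  (species_pairs.foldl (fun (st : Int × PySem.Dict (String × String) Int) pair =>
    let key := pvSortPair pair
    let c := st.2.getD key 0
    (st.1 + c, st.2.insert key (c + 1))) (0, PySem.Dict.empty)).1

-- ===== PRECONDITION & SPEC =====
def Spec_num_equiv_species_pairs (species_pairs : List (String × String)) (out : Int) : Prop := out = num_equiv_species_pairs_alt species_pairs
instance (species_pairs : List (String × String)) (out : Int) : Decidable (Spec_num_equiv_species_pairs species_pairs out) := by unfold Spec_num_equiv_species_pairs; infer_instance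

-- ===== CLAIM (what is proved, stated in full; the proofs are below) =====
def Claim_equal_num_equiv_species_pairs : Prop := ∀ (species_pairs : List (String × String)), Dom_num_equiv_species_pairs species_pairs → Spec_num_equiv_species_pairs species_pairs (num_equiv_species_pairs species_pairs)

-- ===== LEMMAS AND PROOFS =====

-- choose-2 value A adds per group
def pvC2 (c : Int) : Int := PySem.Int.floordiv (c * (c - 1)) 2

-- sum of pvC2 over a dict's values
def pvSumC2 (d : PySem.Dict (String × String) Int) : Int := (d.values.map pvC2).sum

-- the common counting step both ports perform (A's two branches reduce to it)
def pvIns (d : PySem.Dict (String × String) Int) (p : String × String) : PySem.Dict (String × String) Int :=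
  d.insert (pvSortPair p) (d.getD (pvSortPair p) 0 + 1)

lemma pvC2_succ (c : Int) : pvC2 (c + 1) = pvC2 c + c := by
  unfold pvC2
  rw [PySem.Int.floordiv_eq_ediv_of_pos (by norm_num), PySem.Int.floordiv_eq_ediv_of_pos (by norm_num)]
  have h : (c + 1) * (c + 1 - 1) = c * (c - 1) + 2 * c := by ring
  rw [h]; omega

-- summing over a Nodup key list after changing the value at one present key
lemma pvSum_map_update (ks : List (String × String)) (f g : String × String → Int)
    (k : String × String) (hnd : ks.Nodup) (hmem : k ∈ ks)
    (hagree : ∀ j ∈ ks, j ≠ k → f j = g j) :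
    (ks.map f).sum = (ks.map g).sum + (f k - g k) := by
  induction ks with
  | nil => cases hmem
  | cons x xs ih =>
    simp only [List.map_cons, List.sum_cons]
    rcases List.mem_cons.mp hmem with h | h
    · subst h
      have heq : (xs.map f).sum = (xs.map g).sum := by
        have : xs.map f = xs.map g := List.map_congr_left (fun j hj =>
          hagree j (List.mem_cons_of_mem _ hj) (fun he => (List.nodup_cons.mp hnd).1 (he ▸ hj)))
        rw [this]
      rw [heq]; ring
    · have hx : f x = g x := hagree x (List.mem_cons_self) (fun he => (List.nodup_cons.mp hnd).1 (he ▸ h))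
      rw [hx, ih (List.nodup_cons.mp hnd).2 h (fun j hj => hagree j (List.mem_cons_of_mem _ hj))]
      ring

lemma pvSumC2_ins (d : PySem.Dict (String × String) Int) (p : String × String)
    (hnd : d.keys.Nodup) :
    pvSumC2 (pvIns d p) = pvSumC2 d + d.getD (pvSortPair p) 0 := by
  set k := pvSortPair p with hk
  unfold pvSumC2 pvIns
  have hnd' : (d.insert k (d.getD k 0 + 1)).keys.Nodup := PySem.Dict.nodup_keys_insert d _ _ hnd
  rw [PySem.Dict.values_eq_map_keys _ hnd' 0, PySem.Dict.values_eq_map_keys d hnd 0,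
      List.map_map, List.map_map]
  simp only [Function.comp_def]
  by_cases hc : d.contains k = true
  · rw [PySem.Dict.keys_insert_of_contains d _ hc]
    have hmem : k ∈ d.keys := (PySem.Dict.contains_iff_mem_keys d k).mp hc
    rw [pvSum_map_update d.keys (fun j => pvC2 ((d.insert k (d.getD k 0 + 1)).getD j 0))
        (fun j => pvC2 (d.getD j 0)) k hnd hmem (fun j _ hj => by
      simp [PySem.Dict.getD_insert, hj])]
    simp [PySem.Dict.getD_insert, pvC2_succ]
  · have hc' : d.contains k = false := by simpa using hc
    rw [PySem.Dict.keys_insert_of_not_contains d _ hc']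
    have hnmem : k ∉ d.keys := fun h => hc ((PySem.Dict.contains_iff_mem_keys d k).mpr h)
    rw [List.map_append, List.sum_append]
    have hmap : d.keys.map (fun j => pvC2 ((d.insert k (d.getD k 0 + 1)).getD j 0)) =
        d.keys.map (fun j => pvC2 (d.getD j 0)) := by
      apply List.map_congr_left
      intro j hj
      have : j ≠ k := fun he => hnmem (he ▸ hj)
      simp [PySem.Dict.getD_insert, this]
    have h0 : d.getD k 0 = 0 := PySem.Dict.getD_of_not_contains d 0 hc'
    rw [hmap, h0]
    simp [PySem.Dict.getD_insert, pvC2]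

-- A's loop body equals the common counting step
lemma pvStepA_eq (d : PySem.Dict (String × String) Int) (p : String × String) :
    (let normalized_pair := pvSortPair p;
     if d.contains normalized_pair then d.modify normalized_pair 0 (· + 1)
     else d.insert normalized_pair 1) = pvIns d p := by
  unfold pvIns
  by_cases hc : d.contains (pvSortPair p) = true
  · simp only [hc, if_true]; rfl
  · have hc' : d.contains (pvSortPair p) = false := by simpa using hc
    rw [PySem.Dict.getD_of_not_contains d 0 hc']
    simp [hc']

-- B's running total tracks the choose-2 sum of the common count dict
lemma pvInvariant (l : List (String × String)) :
    ∀ (t : Int) (d : PySem.Dict (String × String) Int), d.keys.Nodup →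
    (l.foldl (fun (st : Int × PySem.Dict (String × String) Int) pair =>
      let key := pvSortPair pair
      let c := st.2.getD key 0
      (st.1 + c, st.2.insert key (c + 1))) (t, d)) =
    (t + pvSumC2 (l.foldl pvIns d) - pvSumC2 d, l.foldl pvIns d) := by
  induction l with
  | nil => intro t d _; simp
  | cons x xs ih =>
    intro t d hnd
    show (xs.foldl (fun (st : Int × PySem.Dict (String × String) Int) pair =>
      let key := pvSortPair pair
      let c := st.2.getD key 0
      (st.1 + c, st.2.insert key (c + 1))) (t + d.getD (pvSortPair x) 0, pvIns d x)) = _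
    rw [ih (t + d.getD (pvSortPair x) 0) (pvIns d x)
        (PySem.Dict.nodup_keys_insert d _ _ hnd)]
    rw [List.foldl_cons, pvSumC2_ins d x hnd]
    congr 1
    ring

-- ===== VERDICT (by name: the statement is the Claim_ definition above) =====
theorem num_equiv_species_pairs_spec : Claim_equal_num_equiv_species_pairs := by
  intro sp _
  show num_equiv_species_pairs sp = num_equiv_species_pairs_alt sp
  unfold num_equiv_species_pairs num_equiv_species_pairs_alt
  have hstep : (fun (d : PySem.Dict (String × String) Int) pair =>
      let normalized_pair := pvSortPair pair
      if d.contains normalized_pair then d.modify normalized_pair 0 (· + 1)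
      else d.insert normalized_pair 1) = pvIns := by
    funext d p; exact pvStepA_eq d p
  rw [hstep, pvInvariant sp 0 PySem.Dict.empty PySem.Dict.nodup_keys_empty]
  rw [PySem.List.foldl_add]
  show 0 + ((sp.foldl pvIns PySem.Dict.empty).values.map pvC2).sum =
    0 + pvSumC2 (sp.foldl pvIns PySem.Dict.empty) - pvSumC2 PySem.Dict.empty
  unfold pvSumC2
  simp [PySem.Dict.empty]
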